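-- pv_equiv track=rewrite | github.com/HardCorn/pythonScripts | Buh/smartSplit.py | _symbol_sort
-- ===== SOURCE A (Python) =====
-- def _symbol_sort(lst):      # сортировка символов в порядке: кол-во слов по убыванию количество букв выражении по убыванию
--     res = dict()
--     word_splitter = max(len(each) for each in lst) + 1  # переменная множитель колличества слов (длина максимальной строки + 1)
--     for each in lst:                                    # наполняем временный словарь
--         key = word_splitter * each.count(' ') + len(each)
--         if key not in res:
--             res[key] = list()
--         res[key].append(each)
--     tmp_sort = list(res.keys())                         # забираем и сортируем ключи по убыванию
--     tmp_sort.sort(reverse=True)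
--     res_list = list()
--     for each in tmp_sort:                               # наполняем результирующий список по отсортированным ключам
--         res_list += res[each]
--     return res_list
-- ===== SOURCE B (Python) =====
-- def _symbol_sort(lst):
--     return sorted(lst, key=lambda s: (s.count(' '), len(s)), reverse=True)
-- ===== Notes on version B (the rewrite author's own statement) =====
-- stated objective: simpler
-- what changed: Replaced the hand-rolled bucketing (composite int key = maxlen-scaled word count + length, dict of buckets, manual key sort, concatenation) by one stable sorted() call with the tuple key (space count, length) descending.
import Mathlib
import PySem

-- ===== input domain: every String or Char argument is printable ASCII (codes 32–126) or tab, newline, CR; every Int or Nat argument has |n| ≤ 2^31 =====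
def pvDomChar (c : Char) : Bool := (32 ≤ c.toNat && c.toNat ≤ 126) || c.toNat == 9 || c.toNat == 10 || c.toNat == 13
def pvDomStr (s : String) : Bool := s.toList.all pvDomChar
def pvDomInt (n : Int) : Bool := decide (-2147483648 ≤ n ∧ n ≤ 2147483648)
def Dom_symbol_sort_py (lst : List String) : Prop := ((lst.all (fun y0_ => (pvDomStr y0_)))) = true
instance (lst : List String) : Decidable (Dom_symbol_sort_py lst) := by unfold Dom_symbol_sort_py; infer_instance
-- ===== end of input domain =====

-- ===== PORT A =====
-- One honest line: B replaces A's dict-bucketing by composite int key with a single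
-- stable tuple-key sort (simpler); on the empty list A raises ValueError, which Pre_ excludes.
def symbol_sort_py (lst : List String) : List String :=
  match PySem.List.max? (lst.map (fun each => PySem.Str.len each)) (fun x => x) with
  | none => []   -- unreachable under Pre_: Python's max(...) raises ValueError on an empty lst
  | some m =>
    let word_splitter : Int := m + 1
    let res : PySem.Dict Int (List String) := lst.foldl (fun d each =>
        let key : Int := word_splitter * (PySem.Str.count each " " : Int) + PySem.Str.len each
        let d := if d.contains key then d else d.insert key ([] : List String)
        d.modify key [] (fun l => l ++ [each])) PySem.Dict.empty
    let tmp_sort := PySem.List.sorted res.keys (fun x => x) true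
    tmp_sort.foldl (fun acc k => acc ++ res.getD k []) []

-- ===== PORT B =====
def symbol_sort_py_alt (lst : List String) : List String :=
  PySem.List.sorted2 lst (fun s => (PySem.Str.count s " " : Int)) (fun s => PySem.Str.len s) true

-- ===== PRECONDITION & SPEC =====
-- Pre_ excludes only the empty list, on which Python's A raises ValueError (max() of an empty sequence).
def Pre_symbol_sort_py (lst : List String) : Prop := lst ≠ []
instance (lst : List String) : Decidable (Pre_symbol_sort_py lst) := by unfold Pre_symbol_sort_py; infer_instance
def pvWitness_symbol_sort_py : List String := (["a b", "cc", "x"])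

def Spec_symbol_sort_py (lst : List String) (out : List String) : Prop := out = symbol_sort_py_alt lst
instance (lst : List String) (out : List String) : Decidable (Spec_symbol_sort_py lst out) := by unfold Spec_symbol_sort_py; infer_instance

-- ===== CLAIM (what is proved, stated in full; the proofs are below) =====
def Claim_equal_symbol_sort_py : Prop := ∀ (lst : List String), Dom_symbol_sort_py lst → Pre_symbol_sort_py lst → Spec_symbol_sort_py lst (symbol_sort_py lst)

-- ===== LEMMAS AND PROOFS =====

-- the word-count and length projections and A's composite integer key
def pvCnt (s : String) : Int := (PySem.Str.count s " " : Int)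
def pvLen (s : String) : Int := PySem.Str.len s
def pvKf (M : Int) (s : String) : Int := M * pvCnt s + pvLen s
-- B's lexicographic tuple key
def pvK2 (s : String) : Lex (Int × Int) := toLex (pvCnt s, pvLen s)

theorem pvLen_nonneg (s : String) : 0 ≤ pvLen s := by
  simp [pvLen, PySem.Str.len_eq]

-- insertBy inserts at the first position whose element satisfies `before x`
theorem pv_insertBy_eq (bf : String → String → Bool) (x : String) (S : List String) :
    PySem.List.insertBy bf x S
      = S.takeWhile (fun y => !bf x y) ++ x :: S.dropWhile (fun y => !bf x y) := by
  induction S with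
  | nil => simp [PySem.List.insertBy]
  | cons y ys ih =>
    by_cases h : bf x y
    · simp [PySem.List.insertBy, h, List.takeWhile, List.dropWhile]
    · simp [PySem.List.insertBy, h, List.takeWhile, List.dropWhile, ih]

-- stability of Python's reverse sort: a filter that only keeps one key-class is untouched
theorem pv_sorted_rev_filter {κ : Type} [LinearOrder κ] (key : String → κ) (p : String → Bool)
    (xs : List String) (h : ∀ a ∈ xs, ∀ b ∈ xs, p a = true → p b = true → key a = key b) :
    (PySem.List.sorted xs key true).filter p = xs.filter p := by
  induction xs using List.reverseRecOn with
  | nil => simp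
  | append_singleton ys x ih =>
    have hmem : ∀ a ∈ ys, a ∈ ys ++ [x] := by intro a ha; simp [ha]
    have hys : ∀ a ∈ ys, ∀ b ∈ ys, p a = true → p b = true → key a = key b :=
      fun a ha b hb => h a (hmem a ha) b (hmem b hb)
    rw [PySem.List.sorted_rev_eq_foldl_insertBy, List.foldl_append,
        ← PySem.List.sorted_rev_eq_foldl_insertBy]
    simp only [List.foldl_cons, List.foldl_nil]
    set S := PySem.List.sorted ys key true with hSdef
    set q : String → Bool := fun y => !(fun a b => decide (key b < key a)) x y with hqdef
    rw [pv_insertBy_eq]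
    have hS : S.Pairwise (fun a b => key b ≤ key a) := PySem.List.sorted_pairwise_rev ys key
    have hDlt : ∀ y ∈ S.dropWhile q, key y < key x := by
      intro y hy
      cases hD : S.dropWhile q with
      | nil => rw [hD] at hy; simp at hy
      | cons d D' =>
        have hd : key d < key x := by
          have := List.head?_dropWhile_not q S
          rw [hD] at this
          simp only [List.head?_cons] at this
          simpa [hqdef] using this
        rw [hD] at hy
        rcases List.mem_cons.mp hy with rfl | hy'
        · exact hd
        · have hpw : (d :: D').Pairwise (fun a b => key b ≤ key a) := by
            rw [← hD]; exact hS.sublist (List.dropWhile_sublist q)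
          have := (List.pairwise_cons.mp hpw).1 y hy'
          exact lt_of_le_of_lt this hd
    have hDfilter : p x = true → (S.dropWhile q).filter p = [] := by
      intro hpx
      apply List.filter_eq_nil_iff.mpr
      intro y hy hpy
      have hyS : y ∈ S := (List.dropWhile_sublist q).mem hy
      have hyys : y ∈ ys := (PySem.List.mem_sorted _ _ _ _).mp hyS
      have := h y (hmem y hyys) x (by simp) hpy hpx
      exact absurd this (ne_of_lt (hDlt y hy))
    have hsplit : S.filter p = (S.takeWhile q).filter p ++ (S.dropWhile q).filter p := by
      conv_lhs => rw [← List.takeWhile_append_dropWhile (p := q) (l := S)]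
      rw [List.filter_append]
    rw [List.filter_append, List.filter_cons]
    by_cases hpx : p x
    · simp only [hpx, if_pos]
      rw [List.filter_append, List.filter_cons]
      simp only [hpx, if_pos]
      rw [hDfilter hpx]
      have : (S.takeWhile q).filter p = S.filter p := by rw [hsplit, hDfilter hpx]; simp
      rw [this, ih hys]
      simp
    · simp only [Bool.not_eq_true] at hpx
      have hTD : List.filter p (List.takeWhile (fun y => !decide (key y < key x)) S)
          ++ List.filter p (List.dropWhile (fun y => !decide (key y < key x)) S) = List.filter p ys := by
        rw [← List.filter_append, List.takeWhile_append_dropWhile, ih hys]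
      simp [hpx, hTD]

-- sorted2 with reverse=True is sorted under the lexicographic pair key
theorem pv_sorted2_eq (lst : List String) :
    PySem.List.sorted2 lst (fun s => (PySem.Str.count s " " : Int)) (fun s => PySem.Str.len s) true
      = PySem.List.sorted lst pvK2 true := by
  rw [PySem.List.sorted_rev_eq_foldl_insertBy]
  show List.foldl (fun acc x => PySem.List.insertBy
      (fun a b => decide (pvCnt b < pvCnt a) || (!decide (pvCnt a < pvCnt b) && decide (pvLen b < pvLen a))) x acc) [] lst
    = List.foldl (fun acc x => PySem.List.insertBy (fun a b => decide (pvK2 b < pvK2 a)) x acc) [] lst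
  have hbf : (fun a b : String => decide (pvCnt b < pvCnt a) || (!decide (pvCnt a < pvCnt b) && decide (pvLen b < pvLen a)))
      = (fun a b : String => decide (pvK2 b < pvK2 a)) := by
    funext a b
    simp only [pvK2, Prod.Lex.lt_iff, ofLex_toLex]
    by_cases h1 : pvCnt b < pvCnt a
    · simp [h1]
    · by_cases h2 : pvCnt a < pvCnt b
      · simp [h1, h2]; omega
      · have h3 : pvCnt b = pvCnt a := le_antisymm (not_lt.mp h2) (not_lt.mp h1)
        simp [h3]
  rw [hbf]

-- uniqueness: two key-descending lists with identical per-key filters are equal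
theorem pv_eq_of_filters (kf : String → Int) :
    ∀ (ys zs : List String), ys.Pairwise (fun a b => kf b ≤ kf a) → zs.Pairwise (fun a b => kf b ≤ kf a) →
      (∀ v : Int, ys.filter (fun x => kf x == v) = zs.filter (fun x => kf x == v)) → ys = zs := by
  intro ys
  induction ys with
  | nil =>
    intro zs _ _ hf
    cases zs with
    | nil => rfl
    | cons z zs' =>
      have := hf (kf z)
      simp at this
  | cons y ys' ih =>
    intro zs hy hz hf
    cases zs with
    | nil =>
      have := hf (kf y)
      simp at this
    | cons z zs' =>
      rcases List.pairwise_cons.mp hy with ⟨hy1, hy2⟩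
      rcases List.pairwise_cons.mp hz with ⟨hz1, hz2⟩
      rcases lt_trichotomy (kf y) (kf z) with hlt | heq | hgt
      · exfalso
        have := hf (kf z)
        have hyne : (kf y == kf z) = false := by simp; omega
        rw [List.filter_cons, List.filter_cons] at this
        simp only [hyne] at this
        simp only [beq_self_eq_true, if_pos] at this
        have hnil : ys'.filter (fun x => kf x == kf z) = [] := by
          apply List.filter_eq_nil_iff.mpr
          intro x hx
          have := hy1 x hx
          simp; omega
        rw [hnil] at this
        simp at this
      · have := hf (kf y)
        rw [List.filter_cons, List.filter_cons] at this
        simp only [beq_self_eq_true, if_pos] at this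
        have hz_eq : (kf z == kf y) = true := by simp [heq.symm]
        simp only [hz_eq, if_pos] at this
        have h1 : y = z := (List.cons.injEq _ _ _ _ ▸ this).1
        have h2 : ys'.filter (fun x => kf x == kf y) = zs'.filter (fun x => kf x == kf y) :=
          (List.cons.injEq _ _ _ _ ▸ this).2
        subst h1
        have htails : ∀ v : Int, ys'.filter (fun x => kf x == v) = zs'.filter (fun x => kf x == v) := by
          intro v
          by_cases hv : v = kf y
          · subst hv; exact h2
          · have := hf v
            have hne : (kf y == v) = false := by simp; exact fun h => hv h.symm
            rw [List.filter_cons, List.filter_cons] at this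
            simpa only [hne, if_neg, Bool.false_eq_true, ite_false] using this
        rw [ih zs' hy2 hz2 htails]
      · exfalso
        have := hf (kf y)
        rw [List.filter_cons, List.filter_cons] at this
        simp only [beq_self_eq_true, if_pos] at this
        have hzne : (kf z == kf y) = false := by simp; omega
        simp only [hzne] at this
        have hnil : zs'.filter (fun x => kf x == kf y) = [] := by
          apply List.filter_eq_nil_iff.mpr
          intro x hx
          have := hz1 x hx
          simp; omega
        rw [hnil] at this
        simp at this

-- A's dict-building step is a plain `modify`
theorem pv_step_eq (d : PySem.Dict Int (List String)) (k : Int) (x : String) :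
    (if d.contains k then d else d.insert k ([] : List String)).modify k [] (fun l => l ++ [x])
      = d.modify k [] (fun l => l ++ [x]) := by
  by_cases h : d.contains k
  · simp [h]
  · rw [if_neg (by simp [h])]
    simp only [PySem.Dict.modify, PySem.Dict.insert_insert_self,
      PySem.Dict.getD_insert_self]
    rw [PySem.Dict.getD_of_not_contains (h := by simpa using h)]

-- A's output, in closed form: buckets by key, keys strictly descending
theorem pv_A_eq (lst : List String) (m : Int)
    (hm : PySem.List.max? (lst.map (fun each => PySem.Str.len each)) (fun x => x) = some m) :
    symbol_sort_py lst
      = (PySem.List.sorted (PySem.List.dedup (lst.map (pvKf (m + 1)))) (fun x => x) true).flatMap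
          (fun v => lst.filter (fun x => pvKf (m + 1) x == v)) := by
  unfold symbol_sort_py
  rw [hm]
  simp only []
  have hstep : lst.foldl (fun d each =>
        let key : Int := (m + 1) * (PySem.Str.count each " " : Int) + PySem.Str.len each
        let d := if d.contains key then d else d.insert key ([] : List String)
        d.modify key [] (fun l => l ++ [each])) PySem.Dict.empty
      = lst.foldl (fun d each => d.modify (pvKf (m + 1) each) [] (fun l => l ++ [each])) PySem.Dict.empty := by
    apply PySem.List.foldl_congr_mem
    intro d each _
    exact pv_step_eq d (pvKf (m + 1) each) each
  rw [hstep]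
  have hpairs : lst.foldl (fun d each => d.modify (pvKf (m + 1) each) [] (fun l => l ++ [each])) PySem.Dict.empty
      = (lst.map (fun x => (pvKf (m + 1) x, x))).foldl (fun d p => d.modify p.1 [] (fun l => l ++ [p.2])) PySem.Dict.empty := by
    rw [List.foldl_map]
  have hkeys : (lst.foldl (fun d each => d.modify (pvKf (m + 1) each) [] (fun l => l ++ [each])) PySem.Dict.empty).keys
      = PySem.List.dedup (lst.map (pvKf (m + 1))) := by
    rw [PySem.Dict.keys_foldl_modify_key lst (pvKf (m + 1)) [] (fun _ x => fun l => l ++ [x]) PySem.Dict.empty]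
    simp [PySem.Dict.keys_empty, PySem.Set.update, PySem.List.dedup_eq_ofList, PySem.Set.ofList_eq_foldl]
  have hgetD : ∀ v : Int, (lst.foldl (fun d each => d.modify (pvKf (m + 1) each) [] (fun l => l ++ [each])) PySem.Dict.empty).getD v []
      = lst.filter (fun x => pvKf (m + 1) x == v) := by
    intro v
    rw [hpairs, PySem.Dict.getD_foldl_modify_append]
    rw [PySem.Dict.getD_empty]
    rw [List.filter_map]
    simp [Function.comp_def]
  rw [PySem.List.foldl_append_eq_flatMap, List.nil_append, hkeys]
  congr 1
  funext v
  exact hgetD v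

theorem pv_flatMap_if_single (K : List Int) (v : Int) (L : List String) (hnd : K.Nodup) :
    K.flatMap (fun u => if v = u then L else []) = if v ∈ K then L else [] := by
  induction K with
  | nil => simp
  | cons u K ih =>
    rcases List.nodup_cons.mp hnd with ⟨hu, hnd'⟩
    by_cases h : v = u
    · subst h
      simp [List.flatMap_cons, ih hnd']
      intro hmem; exact absurd hmem hu
    · simp [List.flatMap_cons, h, ih hnd']

-- A's key list, sorted descending, has no duplicates
theorem pv_canon_nodup (kf : String → Int) (lst : List String) :
    (PySem.List.sorted (PySem.List.dedup (lst.map kf)) (fun x => x) true).Nodup := by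
  have hperm := PySem.List.sorted_perm (PySem.List.dedup (lst.map kf)) (fun x => x) true
  exact hperm.nodup_iff.mpr (by rw [PySem.List.dedup_eq_ofList]; exact PySem.Set.nodup_ofList _)

-- the bucketed form has the same per-key filters as the input
theorem pv_filter_canon (kf : String → Int) (lst : List String) (v : Int) :
    ((PySem.List.sorted (PySem.List.dedup (lst.map kf)) (fun x => x) true).flatMap
        (fun u => lst.filter (fun x => kf x == u))).filter (fun x => kf x == v)
      = lst.filter (fun x => kf x == v) := by
  rw [List.filter_flatMap]
  have hfun : (fun u => (lst.filter (fun x => kf x == u)).filter (fun x => kf x == v))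
      = (fun u => if v = u then lst.filter (fun x => kf x == v) else []) := by
    funext u
    rw [List.filter_filter]
    by_cases h : v = u
    · subst h
      simp
    · rw [List.filter_eq_nil_iff.mpr ?_]
      · simp [h]
      · intro x _
        simp only [Bool.and_eq_true, beq_iff_eq, not_and]
        intro h1 h2
        exact h (h2 ▸ h1.symm) |>.elim
  rw [hfun, pv_flatMap_if_single _ _ _ (pv_canon_nodup kf lst)]
  by_cases hv : v ∈ PySem.List.sorted (PySem.List.dedup (lst.map kf)) (fun x => x) true
  · rw [if_pos hv]
  · rw [if_neg hv]
    have hvm : v ∉ lst.map kf := by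
      intro hvm
      exact hv ((PySem.List.mem_sorted _ _ _ _).mpr ((PySem.List.mem_dedup _ _).mpr hvm))
    symm
    apply List.filter_eq_nil_iff.mpr
    intro x hx hbx
    exact hvm (List.mem_map.mpr ⟨x, hx, beq_iff_eq.mp hbx⟩)

-- the bucketed form is key-descending
theorem pv_pairwise_canon (kf : String → Int) (lst : List String) :
    ((PySem.List.sorted (PySem.List.dedup (lst.map kf)) (fun x => x) true).flatMap
        (fun u => lst.filter (fun x => kf x == u))).Pairwise (fun a b => kf b ≤ kf a) := by
  rw [List.pairwise_flatMap]
  constructor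
  · intro u _
    apply List.pairwise_of_forall_mem_list
    intro a ha b hb
    have ha' := beq_iff_eq.mp (List.mem_filter.mp ha).2
    have hb' := beq_iff_eq.mp (List.mem_filter.mp hb).2
    rw [ha', hb']
  · have hle : (PySem.List.sorted (PySem.List.dedup (lst.map kf)) (fun x => x) true).Pairwise
        (fun a b => (fun x => x) b ≤ (fun x => x) a) :=
      PySem.List.sorted_pairwise_rev _ _
    have hnd := pv_canon_nodup kf lst
    have hlt : (PySem.List.sorted (PySem.List.dedup (lst.map kf)) (fun x => x) true).Pairwise
        (fun a b => b < a) := by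
      have := hle.and hnd
      exact this.imp (fun h => lt_of_le_of_ne h.1 (Ne.symm h.2))
    apply hlt.imp
    intro u1 u2 h12 x hx y hy
    have hx' := beq_iff_eq.mp (List.mem_filter.mp hx).2
    have hy' := beq_iff_eq.mp (List.mem_filter.mp hy).2
    rw [hx', hy']
    exact le_of_lt h12

-- key bridge: with lengths below M, composite-key order is lexicographic order
theorem pv_key_le (M : Int) (a b : String) (ha : pvLen a < M) (hb : pvLen b < M)
    (h : pvK2 b ≤ pvK2 a) : pvKf M b ≤ pvKf M a := by
  have hla := pvLen_nonneg a
  have hlb := pvLen_nonneg b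
  rcases Prod.Lex.le_iff.mp h with h1 | ⟨h1, h2⟩
  · simp only [pvK2, ofLex_toLex] at h1
    have hc : pvCnt b + 1 ≤ pvCnt a := h1
    have hM : 0 ≤ M := le_trans hla ha.le
    have := mul_le_mul_of_nonneg_left hc hM
    simp only [pvKf]; nlinarith
  · simp only [pvK2, ofLex_toLex] at h1 h2
    simp only [pvKf, h1]; omega

theorem pv_key_eq (M : Int) (a b : String) (ha : pvLen a < M) (hb : pvLen b < M)
    (h : pvKf M a = pvKf M b) : pvK2 a = pvK2 b := by
  have hla := pvLen_nonneg a
  have hlb := pvLen_nonneg b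
  have hM : 0 < M := lt_of_le_of_lt hla ha
  have hl : pvLen a = pvLen b := by
    have hmod : (pvLen a + pvCnt a * M) % M = (pvLen b + pvCnt b * M) % M := by
      simp only [pvKf] at h
      have : pvLen a + pvCnt a * M = pvLen b + pvCnt b * M := by
        linarith [h, mul_comm M (pvCnt a), mul_comm M (pvCnt b)]
      rw [this]
    rw [Int.add_mul_emod_self_right, Int.add_mul_emod_self_right] at hmod
    rwa [Int.emod_eq_of_lt hla ha, Int.emod_eq_of_lt hlb hb] at hmod
  have hc : pvCnt a = pvCnt b := by
    simp only [pvKf] at h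
    have : M * pvCnt a = M * pvCnt b := by omega
    exact mul_left_cancel₀ (ne_of_gt hM) this
  simp [pvK2, hc, hl]

-- ===== VERDICT (by name: the statement is the Claim_ definition above) =====
theorem symbol_sort_py_spec : Claim_equal_symbol_sort_py := by
  intro lst _hdom hpre
  unfold Spec_symbol_sort_py
  cases hmax : PySem.List.max? (lst.map (fun each => PySem.Str.len each)) (fun x => x) with
  | none =>
    exfalso
    have := (PySem.List.max?_eq_none_iff _ _).mp hmax
    exact hpre (by simpa using this)
  | some m =>
    have hbound : ∀ x ∈ lst, pvLen x < m + 1 := by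
      intro x hx
      have := PySem.List.max?_isMax hmax (PySem.Str.len x) (List.mem_map.mpr ⟨x, hx, rfl⟩)
      simp only [pvLen]
      omega
    rw [pv_A_eq lst m hmax]
    unfold symbol_sort_py_alt
    rw [pv_sorted2_eq]
    apply pv_eq_of_filters (pvKf (m + 1))
    · exact pv_pairwise_canon _ _
    · refine List.Pairwise.imp_of_mem ?_ (PySem.List.sorted_pairwise_rev lst pvK2)
      intro a b ha hb hr
      have ha' : a ∈ lst := (PySem.List.mem_sorted _ _ _ _).mp ha
      have hb' : b ∈ lst := (PySem.List.mem_sorted _ _ _ _).mp hb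
      exact pv_key_le (m + 1) a b (hbound a ha') (hbound b hb') hr
    · intro v
      rw [pv_filter_canon]
      rw [pv_sorted_rev_filter pvK2 (fun x => pvKf (m + 1) x == v) lst ?_]
      intro a ha b hb hpa hpb
      have hva : pvKf (m + 1) a = v := beq_iff_eq.mp hpa
      have hvb : pvKf (m + 1) b = v := beq_iff_eq.mp hpb
      exact pv_key_eq (m + 1) a b (hbound a ha) (hbound b hb) (hva.trans hvb.symm)
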